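-- pv_equiv track=rewrite | github.com/purvilmehta06/CSCI-561-Foundations-of-Artificial-Intelligence | Homework 3/homework.py | perform_distributive_law
-- ===== SOURCE A (Python) =====
-- import copy
--
-- def perform_distributive_law(rule, right):
--     final_rule, rule = [], rule.replace('~~', '')
--     if (right):
--         final_rule = [rule.strip() + ' | ' + right for rule in rule.split('&')]
--     else:
--         new_rules = []
--         for r in rule.split('|'):
--             if '&' in r:
--                 new_rules.append([i.strip() for i in r.strip().split('&')])
--             else:
--                 new_rules.append([r.strip()])
--
--         def make_combinations(new_rules, temp):
--             if (len(temp) == len(new_rules)):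
--                 final_rule.append(copy.deepcopy(temp))
--                 return
--             for i in new_rules[len(temp)]:
--                 temp.append(i)
--                 make_combinations(new_rules, temp)
--                 temp.pop()
--
--         make_combinations(new_rules, [])
--         final_rule = [' | '.join(rule) for rule in final_rule]
--     return final_rule
-- ===== SOURCE B (Python) =====
-- def perform_distributive_law(rule, right):
--     rule = rule.replace('~~', '')
--     if right:
--         return [r.strip() + ' | ' + right for r in rule.split('&')]
--     new_rules = [[i.strip() for i in r.strip().split('&')] if '&' in r else [r.strip()]
--                  for r in rule.split('|')]
--     combos = new_rules[0]
--     for terms in new_rules[1:]: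
--         combos = [c + ' | ' + t for c in combos for t in terms]
--     return combos
-- ===== Notes on version B (the rewrite author's own statement) =====
-- stated objective: simpler
-- what changed: The recursive backtracking helper make_combinations (with deepcopy and a final ' | '.join pass over lists of terms) is replaced by a single left-to-right fold that builds the joined clause strings incrementally with a double comprehension.
import Mathlib
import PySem

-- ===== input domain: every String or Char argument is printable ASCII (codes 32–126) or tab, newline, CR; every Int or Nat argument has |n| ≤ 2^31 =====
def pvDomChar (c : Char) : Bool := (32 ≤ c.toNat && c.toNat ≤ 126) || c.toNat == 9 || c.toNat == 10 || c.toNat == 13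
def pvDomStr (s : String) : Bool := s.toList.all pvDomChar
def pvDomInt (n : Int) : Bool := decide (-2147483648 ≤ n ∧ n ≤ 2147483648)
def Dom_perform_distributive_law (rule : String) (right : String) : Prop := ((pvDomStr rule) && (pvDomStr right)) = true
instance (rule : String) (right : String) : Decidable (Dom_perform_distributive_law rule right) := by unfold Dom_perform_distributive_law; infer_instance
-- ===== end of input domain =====

-- B replaces A's recursive backtracking helper (and its deepcopy + final join pass) by a single
-- left-to-right fold that builds the joined clause strings incrementally (objective: simpler).

-- s.split(sep) for a nonempty literal sep (exact: PySem.Chars.splitOn is the sep ≠ "" form)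
def pySplit (s sep : String) : List String :=
  (PySem.Chars.splitOn s.toList sep.toList).map String.ofList

-- ===== PORT A =====
-- make_combinations: appends to final_rule the Cartesian product of new_rules, extending temp;
-- the for-loop over new_rules[len(temp)] with recursion+pop becomes flatMap over the same row.
def pvMakeCombinations (new_rules : List (List String)) (temp : List String) :
    List (List String) :=
  if temp.length = new_rules.length then [temp]
  else
    match h : new_rules[temp.length]? with
    | none => []  -- unreachable from temp = []: Python would raise IndexError
    | some row => row.flatMap (fun i => pvMakeCombinations new_rules (temp ++ [i]))
termination_by new_rules.length - temp.length
decreasing_by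
  have := (List.getElem?_eq_some_iff.mp h).1
  simp only [List.length_append, List.length_cons, List.length_nil]
  omega

def perform_distributive_law (rule : String) (right : String) : List String :=
  let rule := PySem.Str.replace rule "~~" ""
  if right ≠ "" then
    (pySplit rule "&").map (fun r => PySem.Str.join " | " [PySem.Str.strip r, right])
  else
    let new_rules := (pySplit rule "|").map (fun r =>
      if PySem.Str.isIn "&" r then (pySplit (PySem.Str.strip r) "&").map PySem.Str.strip
      else [PySem.Str.strip r])
    (pvMakeCombinations new_rules []).map (fun c => PySem.Str.join " | " c)

-- ===== PORT B =====
def perform_distributive_law_alt (rule : String) (right : String) : List String :=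
  let rule := PySem.Str.replace rule "~~" ""
  if right ≠ "" then
    (pySplit rule "&").map (fun r => PySem.Str.join " | " [PySem.Str.strip r, right])
  else
    let new_rules := (pySplit rule "|").map (fun r =>
      if PySem.Str.isIn "&" r then (pySplit (PySem.Str.strip r) "&").map PySem.Str.strip
      else [PySem.Str.strip r])
    match new_rules with
    | [] => []  -- unreachable: str.split always returns a nonempty list (new_rules[0] in Python)
    | first :: rest =>
      rest.foldl (fun combos terms =>
        combos.flatMap (fun c => terms.map (fun t => PySem.Str.join " | " [c, t]))) first

-- ===== PRECONDITION & SPEC =====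
def Spec_perform_distributive_law (rule : String) (right : String) (out : List String) : Prop := out = perform_distributive_law_alt rule right
instance (rule : String) (right : String) (out : List String) : Decidable (Spec_perform_distributive_law rule right out) := by unfold Spec_perform_distributive_law; infer_instance

-- ===== CLAIM (what is proved, stated in full; the proofs are below) =====
def Claim_equal_perform_distributive_law : Prop := ∀ (rule : String) (right : String), Dom_perform_distributive_law rule right → Spec_perform_distributive_law rule right (perform_distributive_law rule right)

-- ===== LEMMAS AND PROOFS =====

-- the plain Cartesian product, head varying slowest (the order both programs enumerate)
def pvProd : List (List String) → List (List String)
  | [] => [[]]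
  | r :: rs => r.flatMap (fun i => (pvProd rs).map (i :: ·))

theorem splitOn_go_ne_nil (sep : List Char) :
    ∀ (fuel : Nat) (l cur : List Char) (acc : List (List Char)),
      PySem.Chars.splitOn.go sep fuel l cur acc ≠ [] := by
  intro fuel
  induction fuel with
  | zero => intro l cur acc; simp [PySem.Chars.splitOn.go]
  | succ n ih =>
    intro l cur acc
    cases l with
    | nil => simp [PySem.Chars.splitOn.go]
    | cons c rest =>
      rw [PySem.Chars.splitOn.go]
      split_ifs with h
      · exact ih _ _ _
      · exact ih _ _ _

theorem pySplit_ne_nil (s sep : String) : pySplit s sep ≠ [] := by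
  unfold pySplit PySem.Chars.splitOn
  simp only [ne_eq, List.map_eq_nil_iff]
  exact splitOn_go_ne_nil _ _ _ _ _

theorem str_join_singleton (c : String) : PySem.Str.join " | " [c] = c := by
  apply String.toList_inj.mp
  simp [PySem.Str.toList_join, PySem.Chars.join_singleton]

theorem chars_join_join_cons (sep a b : List Char) (L : List (List Char)) :
    PySem.Chars.join sep ((a ++ sep ++ b) :: L) = PySem.Chars.join sep (a :: b :: L) := by
  cases L with
  | nil => simp [PySem.Chars.join_singleton, PySem.Chars.join_cons_cons]
  | cons x L' =>
    simp [PySem.Chars.join_cons_cons, List.append_assoc]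

theorem join_join_cons (c t : String) (l : List String) :
    PySem.Str.join " | " (PySem.Str.join " | " [c, t] :: l) =
      PySem.Str.join " | " (c :: t :: l) := by
  apply String.toList_inj.mp
  have h2 : (PySem.Str.join " | " [c, t]).toList =
      c.toList ++ " | ".toList ++ t.toList := by
    simp [PySem.Str.toList_join, PySem.Chars.join_cons_cons, PySem.Chars.join_singleton]
  simp only [PySem.Str.toList_join, List.map_cons, h2]
  exact chars_join_join_cons _ _ _ _

theorem pvMakeCombinations_eq (new_rules : List (List String)) :
    ∀ (n : Nat) (temp : List String), temp.length ≤ new_rules.length →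
      new_rules.length - temp.length = n →
      pvMakeCombinations new_rules temp =
        (pvProd (new_rules.drop temp.length)).map (temp ++ ·) := by
  intro n
  induction n with
  | zero =>
    intro temp hle hn
    have hlen : temp.length = new_rules.length := by omega
    rw [pvMakeCombinations]
    simp [hlen, List.drop_length, pvProd]
  | succ n ih =>
    intro temp hle hn
    have hlt : temp.length < new_rules.length := by omega
    have hif : ¬ temp.length = new_rules.length := by omega
    rw [pvMakeCombinations, if_neg hif]
    rw [List.getElem?_eq_getElem hlt]
    have hdrop : new_rules.drop temp.length =
        new_rules[temp.length] :: new_rules.drop (temp.length + 1) :=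
      List.drop_eq_getElem_cons hlt
    rw [hdrop]
    simp only [pvProd, List.map_flatMap, List.map_map]
    apply List.flatMap_congr
    intro i _
    have := ih (temp ++ [i]) (by simp; omega) (by simp; omega)
    rw [this]
    simp [Function.comp, List.append_assoc]

theorem foldl_step_eq (rest : List (List String)) :
    ∀ (acc : List String),
    rest.foldl (fun combos terms =>
        combos.flatMap (fun c => terms.map (fun t => PySem.Str.join " | " [c, t]))) acc =
      acc.flatMap (fun c => (pvProd rest).map (fun l => PySem.Str.join " | " (c :: l))) := by
  induction rest with
  | nil =>
    intro acc
    simp [pvProd, str_join_singleton]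
  | cons terms rest ih =>
    intro acc
    rw [List.foldl_cons, ih]
    simp only [pvProd, List.flatMap_assoc, List.map_flatMap, List.map_map, List.flatMap_map]
    apply List.flatMap_congr
    intro c _
    apply List.flatMap_congr
    intro t _
    simp [Function.comp, join_join_cons]

-- ===== VERDICT (by name: the statement is the Claim_ definition above) =====
theorem perform_distributive_law_spec : Claim_equal_perform_distributive_law := by
  intro rule right _
  unfold Spec_perform_distributive_law perform_distributive_law perform_distributive_law_alt
  dsimp only
  split_ifs with hr
  · rfl
  · set rows := (pySplit (PySem.Str.replace rule "~~" "") "|").map (fun r =>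
      if PySem.Str.isIn "&" r then (pySplit (PySem.Str.strip r) "&").map PySem.Str.strip
      else [PySem.Str.strip r]) with hrowsdef
    have hne : rows ≠ [] := by
      rw [hrowsdef]
      simp only [ne_eq, List.map_eq_nil_iff]
      exact pySplit_ne_nil _ _
    obtain ⟨first, rest, hrows⟩ := List.exists_cons_of_ne_nil hne
    rw [hrows]
    rw [pvMakeCombinations_eq (first :: rest) (first :: rest).length [] (by simp) (by simp)]
    dsimp only
    rw [foldl_step_eq]
    simp [pvProd, List.map_flatMap, List.map_map, Function.comp_def]
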